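-- pv_equiv track=rewrite | github.com/SahilGoel05/CSC202-DataStructuresAndAlgorithms | Projects/Project 1 - Recursion*/perm_lex.py | perm_gen_lex
-- ===== SOURCE A (Python) =====
-- from typing import List
--
-- def perm_gen_lex(str_in: str) -> List:
--     if len(str_in) == 1:
--         return[str_in]
--     temp = []
--     i = 0
--     while i in range(len(str_in)):
--         perm = perm_gen_lex(str_in[0:i] + str_in[i+1:])
--         j = 0
--         while j in range(len(perm)):
--             temp.append(str_in[i:i+1] + perm[j])
--             j += 1
--         i += 1
--
--     return temp
-- ===== SOURCE B (Python) =====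
-- def _fact(p):
--     return 1 if p == 0 else p * _fact(p - 1)
--
-- def perm_gen_lex(str_in):
--     n = len(str_in)
--     if n == 0:
--         return []
--     out = []
--     for k in range(_fact(n)):
--         rem = list(str_in)
--         chars = []
--         r = k
--         for p in range(n - 1, -1, -1):
--             f = _fact(p)
--             chars.append(rem.pop(r // f))
--             r %= f
--         out.append(''.join(chars))
--     return out
-- ===== Notes on version B (the rewrite author's own statement) =====
-- stated objective: alternative
-- what changed: replaces A's recursive prefix-expansion (recompute sub-permutations for every removed character) with a single iterative loop that decodes each rank k in factorial base (Lehmer code), popping the selected character from the remaining list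
import Mathlib
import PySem

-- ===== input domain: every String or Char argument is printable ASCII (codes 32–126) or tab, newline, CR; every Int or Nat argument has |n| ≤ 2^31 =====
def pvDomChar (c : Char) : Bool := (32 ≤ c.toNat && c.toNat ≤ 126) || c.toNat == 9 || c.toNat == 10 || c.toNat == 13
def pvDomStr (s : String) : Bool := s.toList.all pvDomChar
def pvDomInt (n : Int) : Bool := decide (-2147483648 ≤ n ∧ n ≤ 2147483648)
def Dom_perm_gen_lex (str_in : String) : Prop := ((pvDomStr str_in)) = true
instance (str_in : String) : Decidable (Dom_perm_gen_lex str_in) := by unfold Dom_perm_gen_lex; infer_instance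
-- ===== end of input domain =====

-- B replaces A's recursive prefix-expansion by iterative factorial-base (Lehmer) decoding of each rank; alternative algorithm, same output.
-- ===== PORT A =====
-- A recurses on a string one char shorter; we carry strings as List Char (String.mk at the end)
-- and thread the length as structural fuel (fuel = s.length always; fuel 0 ⇒ s = "" ⇒ A's loop body never runs, result []).
def permAcore : Nat → List Char → List (List Char)
  | 0, _ => []
  | fuel + 1, s =>
    if s.length = 1 then [s]
    else
      -- while i in range(len(str_in)): … temp.append(str_in[i:i+1] + perm[j]) …
      (List.range s.length).foldl
        (fun temp i =>
          temp ++ (permAcore fuel (s.take i ++ s.drop (i + 1))).map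
            (fun p => (s.drop i).take 1 ++ p))
        []

def perm_gen_lex (str_in : String) : List String :=
  (permAcore str_in.toList.length str_in.toList).map String.mk

-- ===== PORT B =====
def factAlt : Nat → Nat
  | 0 => 1
  | p + 1 => (p + 1) * factAlt p

-- inner loop: for p in range(n-1, -1, -1): f=_fact(p); chars.append(rem.pop(r//f)); r %= f
-- rem.pop(i) is exact here: the index r // f is always < rem.length inside perm_gen_lex_alt.
def goAlt : List Nat → Nat → List Char → List Char → List Char
  | [], _, _, chars => chars
  | p :: ps, r, rem, chars =>
    let f := factAlt p
    goAlt ps (r % f) (rem.eraseIdx (r / f)) (chars ++ [rem.getD (r / f) ' '])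

def perm_gen_lex_alt (str_in : String) : List String :=
  let s := str_in.toList
  let n := s.length
  if n = 0 then []
  else (List.range (factAlt n)).map
    (fun k => String.mk (goAlt ((List.range n).reverse) k s []))

-- ===== PRECONDITION & SPEC =====
def Spec_perm_gen_lex (str_in : String) (out : List String) : Prop := out = perm_gen_lex_alt str_in
instance (str_in : String) (out : List String) : Decidable (Spec_perm_gen_lex str_in out) := by unfold Spec_perm_gen_lex; infer_instance

-- ===== CLAIM (what is proved, stated in full; the proofs are below) =====
def Claim_equal_perm_gen_lex : Prop := ∀ (str_in : String), Dom_perm_gen_lex str_in → Spec_perm_gen_lex str_in (perm_gen_lex str_in)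

-- ===== LEMMAS AND PROOFS =====

-- the accumulator of goAlt is a pure prefix
lemma goAlt_accum (ps : List Nat) (r : Nat) (rem chars : List Char) :
    goAlt ps r rem chars = chars ++ goAlt ps r rem [] := by
  induction ps generalizing r rem chars with
  | nil => simp [goAlt]
  | cons p ps ih =>
    rw [goAlt, goAlt, ih (chars := chars ++ _), ih (chars := [] ++ _)]
    simp

-- range of a product, as blocks
lemma range_mul_map {α : Type} (a f : Nat) (g : Nat → α) :
    (List.range (a * f)).map g
      = (List.range a).flatMap (fun i => (List.range f).map (fun r => g (i * f + r))) := by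
  induction a with
  | zero => simp
  | succ a ih =>
    have : (a + 1) * f = a * f + f := by ring
    rw [this, List.range_add, List.map_append, ih, List.range_succ, List.flatMap_append]
    simp [Function.comp_def]

lemma factAlt_pos (n : Nat) : 0 < factAlt n := by
  induction n with
  | zero => simp [factAlt]
  | succ m ih => simp [factAlt]; positivity

lemma core_eq (n : Nat) : ∀ (s : List Char), s.length = n → 1 ≤ n →
    permAcore n s = (List.range (factAlt n)).map
      (fun k => goAlt ((List.range n).reverse) k s []) := by
  induction n with
  | zero => intro s _ h; omega
  | succ m ih =>
    intro s hs _
    cases m with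
    | zero =>
      obtain ⟨c, rfl⟩ : ∃ c, s = [c] := by
        cases s with
        | nil => simp at hs
        | cons a t =>
          cases t with
          | nil => exact ⟨a, rfl⟩
          | cons b u => simp at hs
      rfl
    | succ m =>
      have hne : s.length ≠ 1 := by omega
      have hf : 0 < factAlt (m + 1) := factAlt_pos (m + 1)
      rw [permAcore, if_neg hne, PySem.List.foldl_append_eq_flatMap, List.nil_append]
      have hfa : factAlt (m + 2) = (m + 2) * factAlt (m + 1) := rfl
      rw [hfa, range_mul_map, hs]
      rw [List.flatMap_def, List.flatMap_def]
      congr 1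
      apply List.map_congr_left
      intro i hi
      have hilt : i < m + 2 := List.mem_range.mp hi
      have hilt' : i < s.length := by omega
      rw [← List.eraseIdx_eq_take_drop_succ]
      have hlen : (s.eraseIdx i).length = m + 1 := by
        rw [List.length_eraseIdx, if_pos hilt']
        omega
      rw [ih _ hlen (by omega), List.map_map]
      apply List.map_congr_left
      intro r hr
      have hr' : r < factAlt (m + 1) := List.mem_range.mp hr
      have hrev : (List.range (m + 2)).reverse = (m + 1) :: (List.range (m + 1)).reverse := by
        rw [List.range_succ]; simp
      have hdiv : (i * factAlt (m + 1) + r) / factAlt (m + 1) = i := by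
        rw [Nat.add_comm, Nat.add_mul_div_right _ _ hf, Nat.div_eq_of_lt hr', Nat.zero_add]
      have hmod : (i * factAlt (m + 1) + r) % factAlt (m + 1) = r := by
        rw [Nat.add_comm, Nat.add_mul_mod_self_right, Nat.mod_eq_of_lt hr']
      have htake : (s.drop i).take 1 = [s.getD i ' '] := by
        rw [List.drop_eq_getElem_cons hilt', List.getD_eq_getElem _ _ hilt']
        rfl
      simp only [hrev, goAlt, hdiv, hmod, Function.comp_apply, htake]
      rw [goAlt_accum (chars := [] ++ [_])]
      simp

-- ===== VERDICT (by name: the statement is the Claim_ definition above) =====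
theorem perm_gen_lex_spec : Claim_equal_perm_gen_lex := by
  intro s _
  unfold Spec_perm_gen_lex perm_gen_lex perm_gen_lex_alt
  rcases h : s.toList.length with _ | n
  · simp [List.length_eq_zero_iff.mp h, permAcore]
  · simp only [h, Nat.succ_ne_zero, if_false]
    rw [core_eq (n + 1) s.toList h (by omega)]
    simp
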